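-- pv_equiv track=rewrite | github.com/16pierre/traktorBeetsIntegration | scanner.py | _identify_value
-- ===== SOURCE A (Python) =====
-- def _identify_value(user_input, values):
--     if isinstance(values[0], int):
--         try:
--             parsed_input = int(user_input)
--             if parsed_input in values:
--                 return parsed_input
--         except Exception:
--             return None
--     else:
--         user_input = user_input.lower()
--         lowercase_values = [v.lower() for v in values]
--         try:
--             found = lowercase_values.index(user_input)
--             return values[found]
--         except:
--             ...
--         compatible_values = [v for v in lowercase_values
--                              if _are_strings_compatible(user_input, v)]
--         if len(compatible_values) == 1:
--             return values[lowercase_values.index(compatible_values[0])]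
--         return None
--
-- def _are_strings_compatible(compressed, original):
--     compressed = compressed.lower()
--     original = original.lower()
--     if len(compressed) <= 0:
--         return True
--     if len(original) <= 0:
--         return False
--     s = compressed[0]
--     try:
--         index = original.index(s)
--         return _are_strings_compatible(compressed[1:], original[index+1:])
--     except Exception:
--         return False
-- ===== SOURCE B (Python) =====
-- def _identify_value(user_input, values):
--     if isinstance(values[0], int):
--         try:
--             parsed_input = int(user_input)
--         except Exception:
--             return None
--         return parsed_input if parsed_input in values else None
--     ui = user_input.lower()
--     exact = None
--     compat = []
--     for i, v in enumerate(values):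
--         lv = v.lower()
--         if exact is None and lv == ui:
--             exact = i
--         j = 0
--         for ch in lv:
--             if j < len(ui) and ch == ui[j]:
--                 j += 1
--         if j == len(ui):
--             compat.append(i)
--     if exact is not None:
--         return values[exact]
--     if len(compat) == 1:
--         return values[compat[0]]
--     return None
-- ===== Notes on version B (the rewrite author's own statement) =====
-- stated objective: faster
-- what changed: One enumerate pass replaces the exact-match index lookup, the compatibility comprehension and the second index lookup, and an inline two-pointer loop (O(m) per value) replaces the recursive subsequence helper whose slicing and re-lowering cost O(m^2) per value.
-- outside the precondition, e.g. on _identify_value('a', []): A raises IndexError, B raises IndexError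
import Mathlib
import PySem

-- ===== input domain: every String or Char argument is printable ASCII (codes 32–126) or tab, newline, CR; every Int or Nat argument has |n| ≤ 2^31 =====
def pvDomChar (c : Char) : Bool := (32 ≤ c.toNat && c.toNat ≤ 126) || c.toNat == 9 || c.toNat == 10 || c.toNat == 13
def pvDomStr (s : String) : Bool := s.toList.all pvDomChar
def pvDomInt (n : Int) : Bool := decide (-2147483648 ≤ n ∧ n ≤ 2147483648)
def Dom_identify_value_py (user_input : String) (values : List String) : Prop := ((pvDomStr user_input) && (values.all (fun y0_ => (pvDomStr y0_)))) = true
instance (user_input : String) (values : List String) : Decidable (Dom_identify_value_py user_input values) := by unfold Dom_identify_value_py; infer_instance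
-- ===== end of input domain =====

-- B replaces the recursive index-and-slice compatibility helper and the two list
-- comprehensions by a single enumerate pass with an inline two-pointer subsequence loop
-- (objective: faster, measured).

-- ===== PORT A =====
-- _are_strings_compatible: s = compressed[0] is a single character, so original.index(s)
-- is the first index of that character (List.idxOf?); original[index+1:] is drop (index+1).
def pyCompatChars (c o : List Char) : Bool :=
  let cl := PySem.Chars.lower c
  let ol := PySem.Chars.lower o
  match hc : cl with
  | [] => true
  | s :: rest =>
    if ol.length ≤ 0 then false
    else
      match List.idxOf? s ol with
      | none => false
      | some i => pyCompatChars rest (ol.drop (i + 1))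
termination_by c.length
decreasing_by
  have : cl.length = c.length := by simp [cl, PySem.Chars.lower]
  simp only [hc] at this
  simp at this
  omega

-- values : List String, so Python's isinstance(values[0], int) branch is statically dead;
-- Python still evaluates values[0], so Pre_ excludes values = [] (IndexError there).
def identify_value_py (user_input : String) (values : List String) : Option String :=
  let ui := PySem.Str.lower user_input
  let lv := values.map PySem.Str.lower
  match PySem.List.index? lv ui with
  | some found => some (values.getD found "")   -- found < values.length: in-range index
  | none =>
    let compat := lv.filter (fun v => pyCompatChars ui.toList v.toList)
    if compat.length = 1 then
      match PySem.List.index? lv (compat.getD 0 "") with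
      | some i => some (values.getD i "")       -- i < values.length: in-range index
      | none => none                            -- unreachable: compat's element is in lv
    else none

-- ===== PORT B =====
-- the inner two-pointer step: advance j past ui[j] when it matches the next char of lv
def tpStep (u : List Char) (j : Nat) (ch : Char) : Nat :=
  if j < u.length && (u.getD j ' ' == ch) then j + 1 else j

def identify_value_py_alt (user_input : String) (values : List String) : Option String :=
  let ui := (PySem.Str.lower user_input).toList
  let res := (values.zipIdx).foldl
    (fun (st : Option Nat × List Nat) p =>
      let lv := (PySem.Str.lower p.1).toList
      let ex := if st.1.isNone && lv == ui then some p.2 else st.1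
      let j := lv.foldl (tpStep ui) 0
      let cp := if j == ui.length then st.2 ++ [p.2] else st.2
      (ex, cp))
    (none, [])
  match res.1 with
  | some i => some (values.getD i "")           -- i < values.length: index from enumerate
  | none =>
    if res.2.length = 1 then some (values.getD (res.2.getD 0 0) "") else none

-- ===== PRECONDITION & SPEC =====
-- Pre_ excludes only values = [], where Python A raises IndexError on values[0].
def Pre_identify_value_py (user_input : String) (values : List String) : Prop := values ≠ []
instance (user_input : String) (values : List String) : Decidable (Pre_identify_value_py user_input values) := by unfold Pre_identify_value_py; infer_instance
def pvWitness_identify_value_py : String × List String := ("aC", ["abc", "x"])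

def Spec_identify_value_py (user_input : String) (values : List String) (out : Option String) : Prop := out = identify_value_py_alt user_input values
instance (user_input : String) (values : List String) (out : Option String) : Decidable (Spec_identify_value_py user_input values out) := by unfold Spec_identify_value_py; infer_instance

-- ===== CLAIM (what is proved, stated in full; the proofs are below) =====
def Claim_equal_identify_value_py : Prop := ∀ (user_input : String) (values : List String), Dom_identify_value_py user_input values → Pre_identify_value_py user_input values → Spec_identify_value_py user_input values (identify_value_py user_input values)

-- ===== LEMMAS AND PROOFS =====

theorem lowerChar_idem (c : Char) : PySem.Chars.lowerChar (PySem.Chars.lowerChar c) = PySem.Chars.lowerChar c := by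
  simp only [PySem.Chars.lowerChar, PySem.Chars.isupper]
  split_ifs with h1 h2 <;> try rfl
  exfalso
  simp only [Bool.and_eq_true, decide_eq_true_eq] at h1 h2
  have hc1 : 65 ≤ c.toNat := Fin.mk_le_mk.mp h1.1
  have hc2 : c.toNat ≤ 90 := Fin.mk_le_mk.mp h1.2
  have hval : (c.toNat + 32).isValidChar := by left; omega
  have hv : (Char.ofNat (c.toNat + 32)).toNat = c.toNat + 32 := by
    rw [Char.toNat_ofNat, if_pos hval]
  have h90 : (Char.ofNat (c.toNat + 32)).toNat ≤ 90 := Fin.mk_le_mk.mp h2.2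
  omega

theorem lower_idem (l : List Char) : PySem.Chars.lower (PySem.Chars.lower l) = PySem.Chars.lower l := by
  simp [PySem.Chars.lower, List.map_map, Function.comp_def, lowerChar_idem]

-- already-lowered strings stay fixed under a second lowering
theorem lower_toList_fix (s : String) :
    PySem.Chars.lower (PySem.Str.lower s).toList = (PySem.Str.lower s).toList := by
  simp only [PySem.Str.toList_lower]
  exact lower_idem s.toList

-- a head mismatch in a sublist can only be matched further right
theorem sublist_cons_iff_of_ne {a b : Char} {l m : List Char} (h : a ≠ b) :
    (a :: l).Sublist (b :: m) ↔ (a :: l).Sublist m := by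
  constructor
  · intro hs
    cases hs with
    | cons _ h2 => exact h2
    | cons₂ => exact absurd rfl h
  · exact fun hs => hs.cons b

-- greedy step: matching the head at its FIRST occurrence loses nothing
theorem cons_sublist_iff_idx {s : Char} {r : List Char} : ∀ {o : List Char} {i : Nat},
    List.idxOf? s o = some i →
    ((s :: r).Sublist o ↔ r.Sublist (o.drop (i + 1))) := by
  intro o
  induction o with
  | nil => intro i h; simp [List.idxOf?] at h
  | cons a o ih =>
    intro i h
    by_cases hais : a = s
    · subst hais
      rw [List.idxOf?_cons] at h
      simp at h
      subst h
      simpa using List.cons_sublist_cons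
    · rw [List.idxOf?_cons] at h
      have hne : (a == s) = false := by simp [hais]
      rw [hne] at h
      simp at h
      obtain ⟨i', hi', rfl⟩ := h
      rw [sublist_cons_iff_of_ne (fun hsa => hais hsa.symm)]
      simpa using ih hi'

-- A's recursive helper decides "lower c is a subsequence of lower o"
theorem compatA_iff (c o : List Char) :
    pyCompatChars c o = true ↔ (PySem.Chars.lower c).Sublist (PySem.Chars.lower o) := by
  fun_induction pyCompatChars c o with
  | case1 a b c d =>
    have d' : PySem.Chars.lower a = [] := d
    simp [d']
  | case2 a b c d s rest hc hlen =>
    have hc' : PySem.Chars.lower a = s :: rest := hc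
    have hb : PySem.Chars.lower b = [] := by
      have : (PySem.Chars.lower b).length ≤ 0 := hlen
      simpa using List.length_eq_zero_iff.mp (by omega)
    simp [hc', hb]
  | case3 a b c d e f g hlen hidx =>
    have g' : PySem.Chars.lower a = e :: f := g
    have hnm : e ∉ PySem.Chars.lower b := List.idxOf?_eq_none_iff.mp hidx
    simp only [g', Bool.false_eq_true, false_iff]
    intro hs
    exact hnm (hs.subset (List.mem_cons_self))
  | case4 a b c d e f g hlen i hidx ih =>
    have g' : PySem.Chars.lower a = e :: f := g
    have hfa : PySem.Chars.lower f = f := by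
      have := lower_idem a
      rw [g'] at this
      simp [PySem.Chars.lower] at this ⊢
      exact this.2
    have hdb : PySem.Chars.lower (List.drop (i + 1) (PySem.Chars.lower b)) = List.drop (i + 1) (PySem.Chars.lower b) := by
      have h2 : List.map PySem.Chars.lowerChar (List.map PySem.Chars.lowerChar b) = List.map PySem.Chars.lowerChar b := by
        simpa [PySem.Chars.lower] using lower_idem b
      simp only [PySem.Chars.lower, List.map_drop, h2]
    rw [ih, hfa, hdb, g', cons_sublist_iff_idx hidx]

-- once j has reached u.length the two-pointer fold never moves it
theorem tp_stay (u : List Char) : ∀ o : List Char, o.foldl (tpStep u) u.length = u.length := by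
  intro o
  induction o with
  | nil => rfl
  | cons ch o ih => simpa [tpStep] using ih

-- B's two-pointer fold decides "u.drop j is a subsequence of o"
theorem tp_iff (u : List Char) : ∀ (o : List Char) (j : Nat), j ≤ u.length →
    (o.foldl (tpStep u) j = u.length ↔ (u.drop j).Sublist o) := by
  intro o
  induction o with
  | nil =>
    intro j hj
    simp only [List.foldl_nil, List.sublist_nil, List.drop_eq_nil_iff]
    omega
  | cons ch o ih =>
    intro j hj
    rcases Nat.lt_or_ge j u.length with hlt | hge
    · have hdrop : u.drop j = u[j] :: u.drop (j + 1) := by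
        rw [List.drop_eq_getElem_cons hlt]
      by_cases heq : u[j] = ch
      · have hstep : tpStep u j ch = j + 1 := by
          simp [tpStep, hlt, heq]
        rw [List.foldl_cons, hstep, ih (j + 1) (by omega), hdrop, heq]
        exact List.cons_sublist_cons.symm
      · have hstep : tpStep u j ch = j := by
          simp [tpStep, hlt, heq]
        rw [List.foldl_cons, hstep, ih j hj, hdrop, sublist_cons_iff_of_ne heq, ← hdrop]
    · have hj' : j = u.length := by omega
      subst hj'
      have hstep : tpStep u u.length ch = u.length := by simp [tpStep]
      rw [List.foldl_cons, hstep]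
      simp [tp_stay]

-- the two compatibility checks agree on lowered inputs
theorem cmp_bridge (u w : List Char) (hu : PySem.Chars.lower u = u) (hw : PySem.Chars.lower w = w) :
    pyCompatChars u w = (w.foldl (tpStep u) 0 == u.length) := by
  rw [Bool.eq_iff_iff, compatA_iff, hu, hw, beq_iff_eq, tp_iff u w 0 (Nat.zero_le _)]
  simp

-- characterization of B's single fold: first exact-match index, and all compatible indices
theorem foldB_char (u : List Char) :
    ∀ (l : List (String × Nat)) (e0 : Option Nat) (c0 : List Nat),
    l.foldl
      (fun (st : Option Nat × List Nat) p =>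
        let lv := (PySem.Str.lower p.1).toList
        let ex := if st.1.isNone && lv == u then some p.2 else st.1
        let j := lv.foldl (tpStep u) 0
        let cp := if j == u.length then st.2 ++ [p.2] else st.2
        (ex, cp))
      (e0, c0)
    = (e0.or ((l.find? (fun p => (PySem.Str.lower p.1).toList == u)).map (·.2)),
       c0 ++ (l.filter (fun p => (PySem.Str.lower p.1).toList.foldl (tpStep u) 0 == u.length)).map (·.2)) := by
  intro l
  induction l with
  | nil => intro e0 c0; simp
  | cons p l ih =>
    intro e0 c0
    rw [List.foldl_cons, ih]
    rcases e0 with _ | e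
    · by_cases hE : PySem.Chars.lower p.1.toList = u
      · subst hE
        by_cases hC : List.foldl (tpStep (PySem.Chars.lower p.1.toList)) 0 (PySem.Chars.lower p.1.toList) = (PySem.Chars.lower p.1.toList).length <;>
          simp [hC, List.find?_cons, List.filter_cons]
      · by_cases hC : List.foldl (tpStep u) 0 (PySem.Chars.lower p.1.toList) = u.length <;>
          simp [hE, hC, List.find?_cons, List.filter_cons]
    · by_cases hC : List.foldl (tpStep u) 0 (PySem.Chars.lower p.1.toList) = u.length <;>
        simp [hC, List.filter_cons]

-- String equality tests coincide with equality of the character lists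
theorem beq_toList (a b : String) : (a == b) = (a.toList == b.toList) := by
  rw [Bool.eq_iff_iff, beq_iff_eq, beq_iff_eq]
  exact ⟨fun h => h ▸ rfl, fun h => String.toList_inj.mp h⟩

-- A's list.index over the lowered values = B's find? over enumerate
theorem idx_find (f : String → String) (ui : String) :
    ∀ (values : List String) (n : Nat),
    (PySem.List.index? (values.map f) ui).map (· + n)
      = ((values.zipIdx n).find? (fun p => (f p.1).toList == ui.toList)).map (·.2) := by
  intro values
  induction values with
  | nil => intro n; simp [PySem.List.index?, List.idxOf?]
  | cons v vs ih =>
    intro n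
    rw [List.map_cons, PySem.List.index?_eq_idxOf?, List.idxOf?_cons, List.zipIdx_cons, List.find?_cons]
    by_cases h : (f v == ui) = true
    · have h' : ((f v).toList == ui.toList) = true := by rw [← beq_toList]; exact h
      simp [h, h']
    · have h' : ((f v).toList == ui.toList) = false := by rw [← beq_toList]; simpa using h
      rw [if_neg (by simp [h]), h']
      have := ih (n + 1)
      rw [PySem.List.index?_eq_idxOf?] at this
      simp only [Bool.false_eq_true, if_false]
      rw [← this, Option.map_map]
      congr 1
      funext k
      simp only [Function.comp_apply]
      omega

-- the first components of the filtered enumerate are the filtered values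
theorem filter_zipIdx_map_fst (q : String → Bool) :
    ∀ (values : List String) (n : Nat),
    (((values.zipIdx n).filter (fun p => q p.1)).map (·.1)) = values.filter q := by
  intro values
  induction values with
  | nil => intro n; simp
  | cons v vs ih =>
    intro n
    rw [List.zipIdx_cons, List.filter_cons, List.filter_cons]
    by_cases h : q v = true <;> simp [h, ih (n + 1)]

-- a singleton filtered enumerate names the unique index whose value passes q
theorem zipIdx_filter_singleton (q : String → Bool) :
    ∀ (values : List String) (n : Nat) (v0 : String) (i0 : Nat),
    (values.zipIdx n).filter (fun p => q p.1) = [(v0, i0)] →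
    n ≤ i0 ∧ ∃ h : i0 - n < values.length, values[i0 - n] = v0 ∧
      ∀ j (hj : j < values.length), q values[j] = true → j = i0 - n := by
  intro values
  induction values with
  | nil => intro n v0 i0 h; simp at h
  | cons v vs ih =>
    intro n v0 i0 h
    rw [List.zipIdx_cons, List.filter_cons] at h
    by_cases hq : q v = true
    · rw [if_pos hq] at h
      rw [List.cons_eq_cons] at h
      obtain ⟨h1, h2⟩ := h
      injection h1 with hv hn
      subst hv; subst hn
      have hempty : ∀ p ∈ vs.zipIdx (n + 1), ¬ q p.1 = true := List.filter_eq_nil_iff.mp h2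
      refine ⟨Nat.le_refl _, ?_⟩
      simp only [Nat.sub_self]
      refine ⟨by simp, rfl, ?_⟩
      intro j hj hqj
      rcases j with _ | j
      · simp
      · exfalso
        simp only [List.length_cons, Nat.add_lt_add_iff_right] at hj
        have hlen2 : j < (vs.zipIdx (n + 1)).length := by simpa using hj
        have hg := List.getElem_zipIdx (l := vs) (j := n + 1) (i := j) hlen2
        have hmem : (vs[j], n + 1 + j) ∈ vs.zipIdx (n + 1) := hg ▸ List.getElem_mem hlen2
        have := hempty _ hmem
        simp only [List.getElem_cons_succ] at hqj
        exact this hqj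
    · rw [if_neg hq] at h
      obtain ⟨hn, hlt, hval, huniq⟩ := ih (n + 1) v0 i0 h
      refine ⟨by omega, ?_⟩
      have hi : i0 - n = (i0 - (n + 1)) + 1 := by omega
      have hlen : i0 - n < (v :: vs).length := by simp; omega
      refine ⟨hlen, ?_, ?_⟩
      · have hg : (v :: vs)[i0 - n]'hlen = vs[i0 - (n + 1)]'hlt := by
          simp only [hi, List.getElem_cons_succ]
        rw [hg, hval]
      · intro j hj hqj
        rcases j with _ | j
        · simp at hqj; exact absurd hqj hq
        · simp only [List.length_cons, Nat.add_lt_add_iff_right] at hj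
          simp only [List.getElem_cons_succ] at hqj
          have := huniq j hj hqj
          omega

-- the non-exact branch: A's filter + list.index equals B's unique compatible index,
-- abstracted over the lowering map g and the two (pointwise equal) compatibility tests
theorem compat_branch (g : String → String) (qA : String → Bool) (qB : String → Bool)
    (hq : ∀ v, qA (g v) = qB v) (values : List String) :
    (if ((values.map g).filter qA).length = 1 then
       match PySem.List.index? (values.map g) (((values.map g).filter qA).getD 0 "") with
       | some i => some (values.getD i "")
       | none => none
     else none)
    = (if ((values.zipIdx.filter (fun p => qB p.1)).map (·.2)).length = 1 then
         some (values.getD (((values.zipIdx.filter (fun p => qB p.1)).map (·.2)).getD 0 0) "")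
       else none) := by
  have hfilter : (values.map g).filter qA = (values.filter qB).map g := by
    rw [List.filter_map]
    congr 1
    exact List.filter_congr (fun a _ => hq a)
  have hfst := filter_zipIdx_map_fst qB values 0
  rcases hC : values.zipIdx.filter (fun p => qB p.1) with _ | ⟨⟨v0, i0⟩, rest⟩
  · rw [hC] at hfst
    simp only [List.map_nil] at hfst
    rw [hfilter, ← hfst, hC]
    simp
  · rcases rest with _ | ⟨p1, rs⟩
    · rw [hC] at hfst
      simp only [List.map_cons, List.map_nil] at hfst
      obtain ⟨-, hlt, hval, huniq⟩ := zipIdx_filter_singleton qB values 0 v0 i0 hC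
      simp only [Nat.sub_zero] at hlt hval huniq
      have hq0 : qB v0 = true := by
        have hm : (v0, i0) ∈ values.zipIdx.filter (fun p => qB p.1) := by rw [hC]; simp
        exact (List.mem_filter.mp hm).2
      have hidx2 : PySem.List.index? (values.map g) (g v0) = some i0 := by
        rw [PySem.List.index?_eq_idxOf?, List.idxOf?_eq_some_iff]
        refine ⟨by simpa using hlt, by simp [hval], ?_⟩
        intro j hj hne
        have hjlen : j < values.length := by omega
        rw [List.getElem_map] at hne
        have hqj : qB (values[j]'hjlen) = true := by
          rw [← hq, hne, hq]
          exact hq0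
        have := huniq j hjlen hqj
        omega
      rw [PySem.List.index?_eq_idxOf?] at hidx2
      rw [hfilter, ← hfst, hC]
      simp [hidx2]
    · rw [hC] at hfst
      have hlen : (values.filter qB).length = rs.length + 2 := by
        rw [← hfst]; simp
      rw [hfilter, hC]
      simp [hlen]

theorem main_thm (user_input : String) (values : List String) :
    identify_value_py user_input values = identify_value_py_alt user_input values := by
  have hfold := foldB_char ((PySem.Str.lower user_input).toList) values.zipIdx none []
  have hidx := idx_find PySem.Str.lower (PySem.Str.lower user_input) values 0
  rw [identify_value_py, identify_value_py_alt, hfold]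
  have hmap0 : (Option.map (· + 0) (PySem.List.index? (values.map PySem.Str.lower) (PySem.Str.lower user_input))) = PySem.List.index? (values.map PySem.Str.lower) (PySem.Str.lower user_input) := by
    cases PySem.List.index? (values.map PySem.Str.lower) (PySem.Str.lower user_input) <;> simp
  rw [hmap0] at hidx
  rw [Option.none_or, ← hidx]
  rcases hI : PySem.List.index? (values.map PySem.Str.lower) (PySem.Str.lower user_input) with _ | found
  case _ =>
    simp only [List.nil_append]
    exact compat_branch PySem.Str.lower
      (fun v => pyCompatChars (PySem.Str.lower user_input).toList v.toList)
      (fun v => (List.foldl (tpStep (PySem.Str.lower user_input).toList) 0 (PySem.Str.lower v).toList == (PySem.Str.lower user_input).toList.length))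
      (fun v => cmp_bridge _ _ (lower_toList_fix user_input) (lower_toList_fix v))
      values
  case _ => rfl

-- ===== VERDICT (by name: the statement is the Claim_ definition above) =====
theorem identify_value_py_spec : Claim_equal_identify_value_py := by
  intro user_input values _ _
  unfold Spec_identify_value_py
  exact main_thm user_input values
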